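-- pv_equiv track=rewrite | github.com/BigPolarBear1/factorization_v3 | QSv3_version_b.py | find_solution_x
-- ===== SOURCE A (Python) =====
-- def equation(y,x,n,mod):
--     rem=(x**2)+y*-x+n
--     rem2=rem%mod
--     return rem2,rem
--
-- def find_solution_x(n,mod,y):
--     ##to do: can use tonelli if this ends up taking too long
--     rlist=[]
--     x=0
--     while x<mod:
--         test,test2=equation(y,x,n,mod)
--         if test == 0:
--             rlist.append(x)
--         x+=1
--     return [rlist]
-- ===== SOURCE B (Python) =====
-- def find_solution_x(n, mod, y):
--     # Incremental (finite-difference) scan: maintain v == x*x - y*x + n and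
--     # update it with v += 2*x + 1 - y instead of re-evaluating the quadratic.
--     rlist = []
--     v = n
--     for x in range(mod):
--         if v % mod == 0:
--             rlist.append(x)
--         v += 2 * x + 1 - y
--     return [rlist]
-- ===== Notes on version B (the rewrite author's own statement) =====
-- stated objective: faster
-- what changed: Replace the per-iteration closed-form evaluation of x**2 - y*x + n (via the equation helper) by a finite-difference scan that maintains the polynomial's value v and updates it with v += 2*x + 1 - y, testing v % mod == 0 directly.
import Mathlib
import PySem

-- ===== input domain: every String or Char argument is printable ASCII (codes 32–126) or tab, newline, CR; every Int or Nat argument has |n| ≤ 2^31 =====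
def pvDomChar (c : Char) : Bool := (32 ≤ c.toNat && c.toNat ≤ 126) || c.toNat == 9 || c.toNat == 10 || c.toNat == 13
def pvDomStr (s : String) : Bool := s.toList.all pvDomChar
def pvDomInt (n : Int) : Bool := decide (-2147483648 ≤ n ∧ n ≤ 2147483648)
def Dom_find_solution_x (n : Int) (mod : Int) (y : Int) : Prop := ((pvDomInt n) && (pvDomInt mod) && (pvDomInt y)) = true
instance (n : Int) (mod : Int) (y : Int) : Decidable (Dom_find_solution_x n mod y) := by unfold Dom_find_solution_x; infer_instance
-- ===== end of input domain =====

-- B replaces A's per-step closed-form evaluation of x^2 - y*x + n by a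
-- finite-difference scan (v += 2*x + 1 - y); measured constant-factor speedup.

-- ===== PORT A =====
-- helper 'equation' of A
def pvEquation (y x n mod : Int) : Int × Int :=
  let rem := x ^ 2 + y * (-x) + n
  let rem2 := PySem.Int.mod rem mod
  (rem2, rem)

-- A's 'while x < mod: x += 1' loop starting at x = 0 iterates exactly over range(mod)
def find_solution_x (n : Int) (mod : Int) (y : Int) : List (List Int) :=
  let rlist := (PySem.List.pyRange 0 mod 1).foldl
    (fun rlist x =>
      let t := pvEquation y x n mod
      if t.1 = 0 then rlist ++ [x] else rlist) ([] : List Int)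
  [rlist]

-- ===== PORT B =====
def find_solution_x_alt (n : Int) (mod : Int) (y : Int) : List (List Int) :=
  let st := (PySem.List.pyRange 0 mod 1).foldl
    (fun (st : List Int × Int) x =>
      ((if PySem.Int.mod st.2 mod = 0 then st.1 ++ [x] else st.1),
       st.2 + 2 * x + 1 - y)) (([] : List Int), n)
  [st.1]

-- ===== PRECONDITION & SPEC =====
def Spec_find_solution_x (n : Int) (mod : Int) (y : Int) (out : List (List Int)) : Prop := out = find_solution_x_alt n mod y
instance (n : Int) (mod : Int) (y : Int) (out : List (List Int)) : Decidable (Spec_find_solution_x n mod y out) := by unfold Spec_find_solution_x; infer_instance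

-- ===== CLAIM (what is proved, stated in full; the proofs are below) =====
def Claim_equal_find_solution_x : Prop := ∀ (n : Int) (mod : Int) (y : Int), Dom_find_solution_x n mod y → Spec_find_solution_x n mod y (find_solution_x n mod y)

-- ===== LEMMAS AND PROOFS =====

-- Loop invariant: B's accumulator v equals a^2 - y*a + n at the start of the
-- iteration for x = a, and both folds build the same result list.
lemma pv_loop_eq (y n mod b : Int) :
    ∀ (k : Nat) (a : Int) (rl : List Int), b - a = (k : Int) →
    (PySem.List.pyRange a b 1).foldl
      (fun (st : List Int × Int) x =>
        ((if PySem.Int.mod st.2 mod = 0 then st.1 ++ [x] else st.1),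
         st.2 + 2 * x + 1 - y)) (rl, a ^ 2 - y * a + n)
    = ((PySem.List.pyRange a b 1).foldl
        (fun rlist x =>
          let t := pvEquation y x n mod
          if t.1 = 0 then rlist ++ [x] else rlist) rl,
       b ^ 2 - y * b + n) := by
  intro k
  induction k with
  | zero =>
    intro a rl h
    have hab : a = b := by omega
    subst hab
    rw [PySem.List.pyRange_one_eq_nil (le_refl a)]
    simp
  | succ k ih =>
    intro a rl h
    have hlt : a < b := by omega
    rw [PySem.List.pyRange_one_cons hlt]
    simp only [List.foldl_cons]
    have hcond : PySem.Int.mod (a ^ 2 - y * a + n) mod = 0 ↔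
        (pvEquation y a n mod).1 = 0 := by
      simp only [pvEquation]
      have : a ^ 2 + y * (-a) + n = a ^ 2 - y * a + n := by ring
      rw [this]
    have hv : a ^ 2 - y * a + n + 2 * a + 1 - y = (a + 1) ^ 2 - y * (a + 1) + n := by
      ring
    rw [show ((if PySem.Int.mod (a ^ 2 - y * a + n) mod = 0 then rl ++ [a] else rl),
          a ^ 2 - y * a + n + 2 * a + 1 - y)
        = ((if (pvEquation y a n mod).1 = 0 then rl ++ [a] else rl),
          (a + 1) ^ 2 - y * (a + 1) + n) from by
      rw [hv]; congr 1; by_cases hc : (pvEquation y a n mod).1 = 0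
      · rw [if_pos hc, if_pos (hcond.mpr hc)]
      · rw [if_neg hc, if_neg (fun h' => hc (hcond.mp h'))]]
    exact ih (a + 1) _ (by omega)

-- ===== VERDICT (by name: the statement is the Claim_ definition above) =====
theorem find_solution_x_spec : Claim_equal_find_solution_x := by
  intro n mod y _
  unfold Spec_find_solution_x find_solution_x find_solution_x_alt
  by_cases hm : 0 ≤ mod
  · have h0 : ((0 : Int) ^ 2 - y * 0 + n) = n := by ring
    have := pv_loop_eq y n mod mod mod.toNat 0 [] (by omega)
    rw [h0] at this
    simp only [this]
  · rw [PySem.List.pyRange_one_eq_nil (by omega : mod ≤ 0)]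
    simp
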